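-- pv_equiv track=rewrite | github.com/hamedn/SliceNDice | utils.py | build_edge_label_dict
-- ===== SOURCE A (Python) =====
-- def build_edge_label_dict(nx_edge_attr):
--     interm_dict = {}
--     for key, val in nx_edge_attr.items():
--         u_v = (key[0], key[1])
--         if u_v not in interm_dict:
--             interm_dict[u_v] = {}
--         if val[0] not in interm_dict[u_v]:
--             interm_dict[u_v][val[0]] = []
--         interm_dict[u_v][val[0]].append(str(val[1]))
--     return_dict = {}
--     for node_pair, attr_dict in interm_dict.items():
--         edge_str = ''
--         for view, attrs in attr_dict.items():
--             edge_str += '{}: {}'.format(view, ', '.join([attr[:15] for attr in attrs[:1]])) + '\n'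
--         return_dict[node_pair] = edge_str
--     return return_dict
-- ===== SOURCE B (Python) =====
-- def build_edge_label_dict(nx_edge_attr):
--     # Single fused pass: accumulate the formatted label string per node pair directly,
--     # remembering which views were already emitted for each pair.
--     return_dict = {}
--     seen = {}
--     for key, val in nx_edge_attr.items():
--         u_v = (key[0], key[1])
--         view = val[0]
--         label = str(val[1])[:15]
--         if u_v not in return_dict:
--             return_dict[u_v] = ''
--             seen[u_v] = set()
--         if view not in seen[u_v]:
--             seen[u_v].add(view)
--             return_dict[u_v] += '{}: {}'.format(view, label) + '\n'
--     return return_dict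
-- ===== Notes on version B (the rewrite author's own statement) =====
-- stated objective: simpler
-- what changed: A's two-phase pipeline (first group attribute strings into a dict of dicts of lists keyed by node pair and view, then a second nested loop joining and formatting each group) is fused into one pass that accumulates the formatted label string per node pair directly, with a per-pair set of already-emitted views replacing the nested grouping structure.
import Mathlib
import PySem

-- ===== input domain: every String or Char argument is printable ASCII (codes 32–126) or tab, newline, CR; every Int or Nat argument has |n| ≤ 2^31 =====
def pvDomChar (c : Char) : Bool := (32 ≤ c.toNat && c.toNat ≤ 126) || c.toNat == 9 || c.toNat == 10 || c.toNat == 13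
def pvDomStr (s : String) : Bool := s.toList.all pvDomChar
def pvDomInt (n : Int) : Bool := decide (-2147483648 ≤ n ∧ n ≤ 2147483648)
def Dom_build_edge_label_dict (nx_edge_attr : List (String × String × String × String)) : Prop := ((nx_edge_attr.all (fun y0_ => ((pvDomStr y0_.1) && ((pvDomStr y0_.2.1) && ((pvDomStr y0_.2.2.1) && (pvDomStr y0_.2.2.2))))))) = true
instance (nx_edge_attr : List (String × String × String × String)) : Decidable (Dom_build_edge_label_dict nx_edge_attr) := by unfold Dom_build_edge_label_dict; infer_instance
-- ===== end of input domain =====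

-- B fuses A's two-phase group-then-format construction into one pass that accumulates the
-- formatted label per node pair directly (a per-pair seen-set of views replaces the nested
-- grouping dict); objective: simpler.

-- ===== PORT A =====
def build_edge_label_dict (nx_edge_attr : List (String × String × String × String)) : List (String × String × String) :=
  -- first loop: interm_dict groups str(val[1]) by node pair and view
  -- (the in-place mutation interm_dict[u_v][val[0]].append(...) is rendered as read-update-write)
  ((nx_edge_attr.foldl (fun interm_dict kv =>
      let u_v := (kv.1, kv.2.1)
      let interm_dict := if interm_dict.contains u_v then interm_dict
                         else interm_dict.insert u_v PySem.Dict.empty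
      let inner := interm_dict.getD u_v PySem.Dict.empty
      let inner := if inner.contains kv.2.2.1 then inner else inner.insert kv.2.2.1 []
      let inner := inner.insert kv.2.2.1 (inner.getD kv.2.2.1 [] ++ [kv.2.2.2])
      interm_dict.insert u_v inner)
    (PySem.Dict.empty : PySem.Dict (String × String) (PySem.Dict String (List String)))).items.foldl
    -- second loop: return_dict maps each node pair to its formatted edge_str
    (fun return_dict p =>
      let edge_str := p.2.items.foldl (fun edge_str q =>
        edge_str ++ ((q.1 ++ ": " ++ PySem.Str.join ", " ((PySem.List.slice q.2 none (some 1)).map (fun attr => PySem.Str.slice attr none (some 15)))) ++ "\n")) ""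
      return_dict.insert p.1 edge_str)
    (PySem.Dict.empty : PySem.Dict (String × String) String)).items.map (fun p => (p.1.1, p.1.2, p.2))

-- ===== PORT B =====
def build_edge_label_dict_alt (nx_edge_attr : List (String × String × String × String)) : List (String × String × String) :=
  -- one pass: st.1 = return_dict (pair -> accumulated label string), st.2 = seen (pair -> set of views)
  (nx_edge_attr.foldl (fun (st : PySem.Dict (String × String) String × PySem.Dict (String × String) (PySem.Set String)) kv =>
      let u_v := (kv.1, kv.2.1)
      let view := kv.2.2.1
      let label := PySem.Str.slice kv.2.2.2 none (some 15)
      let st := if st.1.contains u_v then st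
                else (st.1.insert u_v "", st.2.insert u_v PySem.Set.empty)
      if PySem.Set.contains (st.2.getD u_v PySem.Set.empty) view then st
      else (st.1.insert u_v (st.1.getD u_v "" ++ ((view ++ ": " ++ label) ++ "\n")),
            st.2.insert u_v (PySem.Set.add (st.2.getD u_v PySem.Set.empty) view)))
    (PySem.Dict.empty, PySem.Dict.empty)).1.items.map (fun p => (p.1.1, p.1.2, p.2))

-- ===== PRECONDITION & SPEC =====
def Spec_build_edge_label_dict (nx_edge_attr : List (String × String × String × String)) (out : List (String × String × String)) : Prop := out = build_edge_label_dict_alt nx_edge_attr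
instance (nx_edge_attr : List (String × String × String × String)) (out : List (String × String × String)) : Decidable (Spec_build_edge_label_dict nx_edge_attr out) := by unfold Spec_build_edge_label_dict; infer_instance

-- ===== CLAIM (what is proved, stated in full; the proofs are below) =====
def Claim_equal_build_edge_label_dict : Prop := ∀ (nx_edge_attr : List (String × String × String × String)), Dom_build_edge_label_dict nx_edge_attr → Spec_build_edge_label_dict nx_edge_attr (build_edge_label_dict nx_edge_attr)

-- ===== LEMMAS AND PROOFS =====
def pedG (q : String × List String) : String :=
  (q.1 ++ ": " ++ PySem.Str.join ", " ((PySem.List.slice q.2 none (some 1)).map (fun attr => PySem.Str.slice attr none (some 15)))) ++ "\n"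

def pedFmt (inner : PySem.Dict String (List String)) : String :=
  inner.items.foldl (fun edge_str q => edge_str ++ pedG q) ""

theorem ped_g_singleton (w a : String) : pedG (w, [a]) = (w ++ ": " ++ PySem.Str.slice a none (some 15)) ++ "\n" := by
  have hsl : PySem.List.slice [a] none (some 1) = [a] := by
    have := PySem.List.slice_to (xs := [a]) (b := 1) (by norm_num)
    simpa using this
  simp [pedG, hsl, PySem.Str.join, PySem.Chars.join, List.intercalate, PySem.Str.slice]

theorem ped_fmt_insert_fresh (inner : PySem.Dict String (List String)) (w : String) (v : List String)
    (h : inner.contains w = false) :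
    pedFmt (inner.insert w v) = pedFmt inner ++ pedG (w, v) := by
  simp [pedFmt, PySem.Dict.items_insert_of_not_contains inner v h, List.foldl_append]

theorem ped_fmt_overwrite (inner : PySem.Dict String (List String)) (w : String) (a : String)
    (hnd : inner.keys.Nodup) (hw : inner.contains w = true)
    (hne : ∀ q ∈ inner.items, q.2 ≠ []) :
    pedFmt (inner.insert w (inner.getD w [] ++ [a])) = pedFmt inner := by
  rw [pedFmt, PySem.Dict.items_insert_of_contains inner _ hw, List.foldl_map]
  apply PySem.List.foldl_congr_mem
  intro acc q hq
  by_cases h : q.1 = w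
  · have hq' : (w, q.2) ∈ inner.items := by rw [← h]; exact hq
    have hget : inner.getD w [] = q.2 := PySem.Dict.getD_of_mem_items inner hq' hnd []
    have hne' : q.2 ≠ [] := hne q hq
    obtain ⟨o, t, ho⟩ : ∃ o t, q.2 = o :: t := by
      cases hcase : q.2 with
      | nil => exact absurd hcase hne'
      | cons o t => exact ⟨o, t, rfl⟩
    have h1 : PySem.List.slice (q.2 ++ [a]) none (some 1) = PySem.List.slice q.2 none (some 1) := by
      rw [PySem.List.slice_to _ (by norm_num), PySem.List.slice_to _ (by norm_num), ho]
      simp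
    simp [h, pedG, hget, h1]
  · simp [pedG, h]

def pedStepA (interm_dict : PySem.Dict (String × String) (PySem.Dict String (List String)))
    (kv : String × String × String × String) : PySem.Dict (String × String) (PySem.Dict String (List String)) :=
  let u_v := (kv.1, kv.2.1)
  let interm_dict := if interm_dict.contains u_v then interm_dict
                     else interm_dict.insert u_v PySem.Dict.empty
  let inner := interm_dict.getD u_v PySem.Dict.empty
  let inner := if inner.contains kv.2.2.1 then inner else inner.insert kv.2.2.1 []
  let inner := inner.insert kv.2.2.1 (inner.getD kv.2.2.1 [] ++ [kv.2.2.2])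
  interm_dict.insert u_v inner

def pedStepB (st : PySem.Dict (String × String) String × PySem.Dict (String × String) (PySem.Set String))
    (kv : String × String × String × String) : PySem.Dict (String × String) String × PySem.Dict (String × String) (PySem.Set String) :=
  let u_v := (kv.1, kv.2.1)
  let view := kv.2.2.1
  let label := PySem.Str.slice kv.2.2.2 none (some 15)
  let st := if st.1.contains u_v then st
            else (st.1.insert u_v "", st.2.insert u_v PySem.Set.empty)
  if PySem.Set.contains (st.2.getD u_v PySem.Set.empty) view then st
  else (st.1.insert u_v (st.1.getD u_v "" ++ ((view ++ ": " ++ label) ++ "\n")),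
        st.2.insert u_v (PySem.Set.add (st.2.getD u_v PySem.Set.empty) view))

def pedInv (d : PySem.Dict (String × String) (PySem.Dict String (List String)))
    (rd : PySem.Dict (String × String) String) (sn : PySem.Dict (String × String) (PySem.Set String)) : Prop :=
  d.keys.Nodup ∧
  rd.items = d.items.map (fun p => (p.1, pedFmt p.2)) ∧
  sn.items = d.items.map (fun p => (p.1, (p.2.keys : PySem.Set String))) ∧
  (∀ p ∈ d.items, p.2.keys.Nodup ∧ ∀ q ∈ p.2.items, q.2 ≠ [])

theorem ped_keys_of_items_map {κ ν ν' : Type} [BEq κ] (rd : PySem.Dict κ ν') (d : PySem.Dict κ ν)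
    (f : κ × ν → ν') (h : rd.items = d.items.map (fun p => (p.1, f p))) : rd.keys = d.keys := by
  simp [PySem.Dict.keys, h, List.map_map, Function.comp]

theorem ped_fmt_empty : pedFmt PySem.Dict.empty = "" := rfl

theorem ped_step (d : PySem.Dict (String × String) (PySem.Dict String (List String)))
    (rd : PySem.Dict (String × String) String) (sn : PySem.Dict (String × String) (PySem.Set String))
    (kv : String × String × String × String) (h : pedInv d rd sn) :
    pedInv (pedStepA d kv) (pedStepB (rd, sn) kv).1 (pedStepB (rd, sn) kv).2 := by
  obtain ⟨hnd, hrd, hsn, hin⟩ := h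
  have hkrd : rd.keys = d.keys := ped_keys_of_items_map rd d _ hrd
  have hksn : sn.keys = d.keys := ped_keys_of_items_map sn d _ hsn
  have hndrd : rd.keys.Nodup := hkrd ▸ hnd
  have hndsn : sn.keys.Nodup := hksn ▸ hnd
  have hcrd : rd.contains (kv.1, kv.2.1) = d.contains (kv.1, kv.2.1) := by
    rw [PySem.Dict.contains_eq_decide_mem_keys, PySem.Dict.contains_eq_decide_mem_keys, hkrd]
  cases hc : d.contains (kv.1, kv.2.1) with
  | true =>
    obtain ⟨inner, hget⟩ : ∃ v, d.get? (kv.1, kv.2.1) = some v := by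
      rw [PySem.Dict.contains_eq_isSome_get?] at hc
      exact Option.isSome_iff_exists.mp hc
    have hgetD : d.getD (kv.1, kv.2.1) PySem.Dict.empty = inner :=
      PySem.Dict.getD_of_get?_eq_some d _ hget
    have hmem : ((kv.1, kv.2.1), inner) ∈ d.items := PySem.Dict.mem_items_of_get?_eq_some d hget
    have hinner := hin _ hmem
    have hsn_u : sn.getD (kv.1, kv.2.1) PySem.Set.empty = inner.keys := by
      have hm : ((kv.1, kv.2.1), (inner.keys : PySem.Set String)) ∈ sn.items := by
        rw [hsn]; exact List.mem_map_of_mem hmem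
      exact PySem.Dict.getD_of_mem_items sn hm hndsn _
    have hsn_u' : sn.getD (kv.1, kv.2.1) [] = inner.keys := hsn_u
    have hrd_u : rd.getD (kv.1, kv.2.1) "" = pedFmt inner := by
      have hm : ((kv.1, kv.2.1), pedFmt inner) ∈ rd.items := by
        rw [hrd]; exact List.mem_map_of_mem hmem
      exact PySem.Dict.getD_of_mem_items rd hm hndrd _
    -- p.2 is determined by p.1 on d.items (keys are nodup)
    have hval : ∀ p ∈ d.items, p.1 = (kv.1, kv.2.1) → p.2 = inner := by
      intro p hp hp1
      have : (p.1, p.2) ∈ d.items := hp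
      rw [hp1] at this
      have := PySem.Dict.getD_of_mem_items d this hnd PySem.Dict.empty
      rw [hgetD] at this; exact this.symm
    cases hw : inner.contains kv.2.2.1 with
    | true =>
      have hstepA : pedStepA d kv
          = d.insert (kv.1, kv.2.1) (inner.insert kv.2.2.1 (inner.getD kv.2.2.1 [] ++ [kv.2.2.2])) := by
        simp [pedStepA, hc, hgetD, hw]
      have hmemw : kv.2.2.1 ∈ inner.keys := (PySem.Dict.contains_iff_mem_keys inner _).mp hw
      have hstepB : pedStepB (rd, sn) kv = (rd, sn) := by
        simp [pedStepB, hcrd, hc, hsn_u', hmemw]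
      rw [hstepA, hstepB]
      refine ⟨?_, ?_, ?_, ?_⟩
      · rw [PySem.Dict.keys_insert_of_contains d _ hc]; exact hnd
      · rw [PySem.Dict.items_insert_of_contains d _ hc, List.map_map, hrd]
        refine List.map_congr_left (fun p hp => ?_)
        by_cases hp1 : p.1 = (kv.1, kv.2.1)
        · have hp2 := hval p hp hp1
          simp only [Function.comp, hp1, beq_self_eq_true, if_true, hp2]
          rw [ped_fmt_overwrite inner _ _ hinner.1 hw hinner.2]
        · simp [Function.comp, hp1]
      · rw [PySem.Dict.items_insert_of_contains d _ hc, List.map_map, hsn]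
        refine List.map_congr_left (fun p hp => ?_)
        by_cases hp1 : p.1 = (kv.1, kv.2.1)
        · have hp2 := hval p hp hp1
          simp only [Function.comp, hp1, beq_self_eq_true, if_true, hp2]
          rw [PySem.Dict.keys_insert_of_contains inner _ hw]
        · simp [Function.comp, hp1]
      · intro p hp
        rw [PySem.Dict.mem_items_insert] at hp
        rcases hp with hp | ⟨hp, _⟩
        · subst hp
          refine ⟨by rw [PySem.Dict.keys_insert_of_contains inner _ hw]; exact hinner.1, ?_⟩
          intro q hq
          rw [PySem.Dict.mem_items_insert] at hq
          rcases hq with hq | ⟨hq, _⟩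
          · subst hq; simp
          · exact hinner.2 q hq
        · exact hin p hp
    | false =>
      have hstepA : pedStepA d kv = d.insert (kv.1, kv.2.1) (inner.insert kv.2.2.1 [kv.2.2.2]) := by
        simp [pedStepA, hc, hgetD, hw, PySem.Dict.getD_insert_self, PySem.Dict.insert_insert_self]
      have hstepB : pedStepB (rd, sn) kv
          = (rd.insert (kv.1, kv.2.1) (pedFmt inner ++ ((kv.2.2.1 ++ ": " ++ PySem.Str.slice kv.2.2.2 none (some 15)) ++ "\n")),
             sn.insert (kv.1, kv.2.1) (inner.keys ++ [kv.2.2.1])) := by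
        have hnw : kv.2.2.1 ∉ inner.keys := fun hm => by
          rw [(PySem.Dict.contains_iff_mem_keys inner _).mpr hm] at hw; cases hw
        simp [pedStepB, hcrd, hc, hsn_u', hnw, hrd_u, PySem.Set.add, PySem.Set.contains]
      rw [hstepA, hstepB]
      have hrdc : rd.contains (kv.1, kv.2.1) = true := hcrd.trans hc
      have hsnc : sn.contains (kv.1, kv.2.1) = true := by
        rw [PySem.Dict.contains_eq_decide_mem_keys, hksn, ← PySem.Dict.contains_eq_decide_mem_keys]; exact hc
      refine ⟨?_, ?_, ?_, ?_⟩
      · rw [PySem.Dict.keys_insert_of_contains d _ hc]; exact hnd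
      · rw [PySem.Dict.items_insert_of_contains d _ hc, List.map_map,
            PySem.Dict.items_insert_of_contains rd _ hrdc, hrd, List.map_map]
        refine List.map_congr_left (fun p hp => ?_)
        by_cases hp1 : p.1 = (kv.1, kv.2.1)
        · have hp2 := hval p hp hp1
          simp only [Function.comp, hp1, beq_self_eq_true, if_true, hp2]
          rw [ped_fmt_insert_fresh inner _ _ hw, ped_g_singleton]
        · simp [Function.comp, hp1]
      · rw [PySem.Dict.items_insert_of_contains d _ hc, List.map_map,
            PySem.Dict.items_insert_of_contains sn _ hsnc, hsn, List.map_map]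
        refine List.map_congr_left (fun p hp => ?_)
        by_cases hp1 : p.1 = (kv.1, kv.2.1)
        · have hp2 := hval p hp hp1
          simp only [Function.comp, hp1, beq_self_eq_true, if_true, hp2]
          rw [PySem.Dict.keys_insert_of_not_contains inner _ hw]
        · simp [Function.comp, hp1]
      · intro p hp
        rw [PySem.Dict.mem_items_insert] at hp
        rcases hp with hp | ⟨hp, _⟩
        · subst hp
          refine ⟨PySem.Dict.nodup_keys_insert inner _ _ hinner.1, ?_⟩
          intro q hq
          rw [PySem.Dict.mem_items_insert] at hq
          rcases hq with hq | ⟨hq, _⟩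
          · subst hq; simp
          · exact hinner.2 q hq
        · exact hin p hp
  | false =>
    have hstepA : pedStepA d kv
        = d.insert (kv.1, kv.2.1) ((PySem.Dict.empty : PySem.Dict String (List String)).insert kv.2.2.1 [kv.2.2.2]) := by
      simp [pedStepA, hc, PySem.Dict.getD_insert_self, PySem.Dict.insert_insert_self,
        PySem.Dict.contains_empty]
    have hstepB : pedStepB (rd, sn) kv
        = (rd.insert (kv.1, kv.2.1) ("" ++ ((kv.2.2.1 ++ ": " ++ PySem.Str.slice kv.2.2.2 none (some 15)) ++ "\n")),
           sn.insert (kv.1, kv.2.1) [kv.2.2.1]) := by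
      simp [pedStepB, hcrd, hc, PySem.Dict.getD_insert_self, PySem.Dict.insert_insert_self,
        PySem.Set.add, PySem.Set.contains, PySem.Set.empty]
    rw [hstepA, hstepB]
    have hrdc : rd.contains (kv.1, kv.2.1) = false := hcrd.trans hc
    have hsnc : sn.contains (kv.1, kv.2.1) = false := by
      rw [PySem.Dict.contains_eq_decide_mem_keys, hksn, ← PySem.Dict.contains_eq_decide_mem_keys]; exact hc
    have hnmem : (kv.1, kv.2.1) ∉ d.keys := fun hm => by
      rw [(PySem.Dict.contains_iff_mem_keys d _).mpr hm] at hc; cases hc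
    refine ⟨?_, ?_, ?_, ?_⟩
    · rw [PySem.Dict.keys_insert_of_not_contains d _ hc]
      simp [List.nodup_append, hnd]
      intro a b hab ha hb
      exact hnmem (by rw [← ha, ← hb]; exact hab)
    · rw [PySem.Dict.items_insert_of_not_contains d _ hc,
          PySem.Dict.items_insert_of_not_contains rd _ hrdc, List.map_append, hrd]
      simp [ped_fmt_insert_fresh PySem.Dict.empty _ _ (PySem.Dict.contains_empty _),
        ped_g_singleton, ped_fmt_empty]
    · rw [PySem.Dict.items_insert_of_not_contains d _ hc,
          PySem.Dict.items_insert_of_not_contains sn _ hsnc, List.map_append, hsn]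
      simp [PySem.Dict.keys_insert_of_not_contains PySem.Dict.empty _ (PySem.Dict.contains_empty _),
        PySem.Dict.keys_empty]
    · intro p hp
      rw [PySem.Dict.mem_items_insert] at hp
      rcases hp with hp | ⟨hp, _⟩
      · subst hp
        constructor
        · rw [PySem.Dict.keys_insert_of_not_contains PySem.Dict.empty _ (PySem.Dict.contains_empty _)]
          simp [PySem.Dict.keys_empty]
        · intro q hq
          rw [PySem.Dict.mem_items_insert] at hq
          rcases hq with hq | ⟨hq, hq'⟩
          · subst hq; simp
          · exact absurd hq (by simp [PySem.Dict.empty])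
      · exact hin p hp

theorem ped_fold (l : List (String × String × String × String)) :
    ∀ d rd sn, pedInv d rd sn →
      pedInv (l.foldl pedStepA d) (l.foldl pedStepB (rd, sn)).1 (l.foldl pedStepB (rd, sn)).2 := by
  induction l with
  | nil => intro d rd sn h; exact h
  | cons kv l ih =>
    intro d rd sn h
    simp only [List.foldl_cons]
    rw [show pedStepB (rd, sn) kv = ((pedStepB (rd, sn) kv).1, (pedStepB (rd, sn) kv).2) from rfl]
    exact ih _ _ _ (ped_step d rd sn kv h)

theorem ped_inv_empty : pedInv PySem.Dict.empty PySem.Dict.empty PySem.Dict.empty := by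
  refine ⟨?_, ?_, ?_, ?_⟩ <;> simp [PySem.Dict.empty, PySem.Dict.keys]

theorem ped_main (nx : List (String × String × String × String)) :
    build_edge_label_dict nx = build_edge_label_dict_alt nx := by
  obtain ⟨hnd, hrd, hsn, hin⟩ :=
    ped_fold nx PySem.Dict.empty PySem.Dict.empty PySem.Dict.empty ped_inv_empty
  have hA : build_edge_label_dict nx
      = ((nx.foldl pedStepA PySem.Dict.empty).items.foldl
          (fun return_dict p => return_dict.insert p.1 (pedFmt p.2))
          (PySem.Dict.empty : PySem.Dict (String × String) String)).items.map (fun p => (p.1.1, p.1.2, p.2)) := rfl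
  have hB : build_edge_label_dict_alt nx
      = (nx.foldl pedStepB (PySem.Dict.empty, PySem.Dict.empty)).1.items.map (fun p => (p.1.1, p.1.2, p.2)) := rfl
  rw [hA, hB]
  rw [PySem.Dict.items_foldl_insert_fresh ((nx.foldl pedStepA PySem.Dict.empty).items)
        (fun p => p.1) (fun p => pedFmt p.2) PySem.Dict.empty
        (fun a _ => PySem.Dict.contains_empty _) hnd]
  rw [← hrd]
  rfl

-- ===== VERDICT (by name: the statement is the Claim_ definition above) =====
theorem build_edge_label_dict_spec : Claim_equal_build_edge_label_dict := by
  intro nx _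
  unfold Spec_build_edge_label_dict
  exact ped_main nx
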